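-- pv_equiv track=rewrite | github.com/napisani/dotfiles-nix | mods/dotfiles/toolbox/stackman/src/stackman/graph.py | descendant_closure
-- ===== SOURCE A (Python) =====
-- from collections import defaultdict, deque
-- from collections.abc import Iterable, Mapping, Sequence
--
-- def topological_order(branch_parents: Mapping[str, str | None]) -> list[str]:
--     children: dict[str, list[str]] = defaultdict(list)
--     indegree: dict[str, int] = {branch: 0 for branch in branch_parents}
--
--     for branch, parent in branch_parents.items():
--         if parent is None:
--             continue
--         children[parent].append(branch)
--         indegree.setdefault(parent, 0)
--         indegree[branch] = indegree.get(branch, 0) + 1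
--
--     for sibling_list in children.values():
--         sibling_list.sort()
--
--     queue: deque[str] = deque(sorted(branch for branch, degree in indegree.items() if degree == 0))
--     ordered: list[str] = []
--
--     while queue:
--         branch = queue.popleft()
--         if branch in branch_parents:
--             ordered.append(branch)
--         for child in children.get(branch, []):
--             indegree[child] -= 1
--             if indegree[child] == 0:
--                 queue.append(child)
--
--     if len(ordered) != len(branch_parents):
--         missing = [branch for branch in branch_parents if branch not in ordered]
--         raise ValueError(f"Cycle detected or disconnected graph: {missing!r}")
--
--     return ordered
--
-- def descendant_closure(
--     seeds: Iterable[str],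
--     branch_parents: Mapping[str, str | None],
-- ) -> list[str]:
--     seed_set = list(dict.fromkeys(seeds))
--     children = _children_map(branch_parents)
--     seen: set[str] = set()
--     ordered: list[str] = []
--     queue: deque[str] = deque(seed_set)
--
--     while queue:
--         branch = queue.popleft()
--         if branch in seen:
--             continue
--         seen.add(branch)
--         if branch in branch_parents:
--             ordered.append(branch)
--         for child in children.get(branch, []):
--             if child not in seen:
--                 queue.append(child)
--
--     return [branch for branch in topological_order(branch_parents) if branch in seen]
--
-- def _children_map(branch_parents: Mapping[str, str | None]) -> dict[str, list[str]]:
--     children: dict[str, list[str]] = defaultdict(list)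
--     for branch, parent in branch_parents.items():
--         if parent is not None:
--             children[parent].append(branch)
--     for sibling_list in children.values():
--         sibling_list.sort()
--     return children
-- ===== SOURCE B (Python) =====
-- from collections.abc import Iterable, Mapping
--
--
-- def _ordered_branches(branch_parents: "Mapping[str, str | None]") -> list[str]:
--     # Root-driven BFS: no indegree bookkeeping is needed because every branch has at
--     # most one parent, so a branch becomes ready exactly when its parent is popped.
--     parents = {p for p in branch_parents.values() if p is not None}
--     queue = sorted(n for n in set(branch_parents) | parents
--                    if branch_parents.get(n) is None)
--     ordered: list[str] = []
--     i = 0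
--     while i < len(queue):
--         node = queue[i]
--         i += 1
--         if node in branch_parents:
--             ordered.append(node)
--         queue.extend(sorted(c for c, p in branch_parents.items() if p == node))
--     if len(ordered) != len(branch_parents):
--         missing = [branch for branch in branch_parents if branch not in ordered]
--         raise ValueError(f"Cycle detected or disconnected graph: {missing!r}")
--     return ordered
--
--
-- def descendant_closure(
--     seeds: "Iterable[str]",
--     branch_parents: "Mapping[str, str | None]",
-- ) -> list[str]:
--     order = _ordered_branches(branch_parents)  # raises on cycles, like A
--     seed_set = set(seeds)
--     result: list[str] = []
--     for branch in order:
--         node: "str | None" = branch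
--         while node is not None:
--             if node in seed_set:
--                 result.append(branch)
--                 break
--             node = branch_parents.get(node)
--     return result
-- ===== Notes on version B (the rewrite author's own statement) =====
-- stated objective: simpler
-- what changed: B drops A's indegree bookkeeping and children/seen/queue machinery entirely: since every branch has at most one parent, a branch becomes ready exactly when its parent is popped, so B orders the forest by a root-driven BFS (sorted roots, then sorted children of each popped node) and then keeps a branch iff climbing its parent chain reaches a seed, instead of A's Kahn indegree loop plus a downward BFS over a children map filtered through a seen set.
import Mathlib
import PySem

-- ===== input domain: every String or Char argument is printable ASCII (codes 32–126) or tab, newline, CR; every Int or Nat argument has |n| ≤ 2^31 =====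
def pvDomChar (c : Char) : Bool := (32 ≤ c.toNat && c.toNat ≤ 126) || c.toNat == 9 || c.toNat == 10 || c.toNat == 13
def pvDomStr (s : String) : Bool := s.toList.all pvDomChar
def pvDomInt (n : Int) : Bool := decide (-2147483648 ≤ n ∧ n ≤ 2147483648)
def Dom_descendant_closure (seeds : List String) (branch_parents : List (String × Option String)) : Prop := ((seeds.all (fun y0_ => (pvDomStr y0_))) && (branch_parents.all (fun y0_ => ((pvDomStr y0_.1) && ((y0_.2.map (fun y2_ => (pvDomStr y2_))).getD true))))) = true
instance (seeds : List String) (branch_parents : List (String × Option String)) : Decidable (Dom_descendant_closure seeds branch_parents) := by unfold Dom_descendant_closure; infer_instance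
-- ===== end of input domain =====

-- B replaces A's Kahn indegree loop and downward BFS over a children map (queue + seen set) by a
-- root-driven BFS (no indegree/children/seen bookkeeping) followed by an upward parent-chain walk.

-- ===== PORT A =====
-- `for sibling_list in children.values(): sibling_list.sort()` — in-place sort of every value
def pvSortVals (children : PySem.Dict String (List String)) : PySem.Dict String (List String) :=
  children.keys.foldl (fun d k => d.modify k [] (fun l => PySem.List.sorted l (fun x => x) false)) children

-- the `while queue:` loop of topological_order; fuel bounds the number of pops
-- (each node enters the queue at most once, so `2 * |branch_parents| + 2` is generous)
def pvTopoLoop (d : PySem.Dict String (Option String)) (children : PySem.Dict String (List String)) :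
    Nat → List String → PySem.Dict String Int → List String → List String
  | 0, _, _, ordered => ordered
  | _ + 1, [], _, ordered => ordered
  | fuel + 1, branch :: queue, indegree, ordered =>
    let ordered' := if d.contains branch then ordered ++ [branch] else ordered
    let s := (children.getD branch []).foldl
      (fun (s : PySem.Dict String Int × List String) child =>
        let ind := s.1.modify child 0 (· - 1)
        let q := if ind.getD child 0 = 0 then s.2 ++ [child] else s.2
        (ind, q)) (indegree, queue)
    pvTopoLoop d children fuel s.2 s.1 ordered'

-- the final `if len(ordered) != len(branch_parents): raise ValueError(...)` is the raise excluded by Pre_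
def topological_order (branch_parents : List (String × Option String)) : List String :=
  let d := PySem.Dict.ofList branch_parents
  let indegree0 : PySem.Dict String Int := d.keys.foldl (fun m b => m.insert b 0) PySem.Dict.empty
  let ci := d.items.foldl
    (fun (s : PySem.Dict String (List String) × PySem.Dict String Int) bp =>
      match bp.2 with
      | none => s
      | some parent =>
        let children := s.1.modify parent [] (· ++ [bp.1])
        let indeg := s.2.setdefault parent 0
        let indeg := indeg.insert bp.1 (indeg.getD bp.1 0 + 1)
        (children, indeg)) ((PySem.Dict.empty : PySem.Dict String (List String)), indegree0)
  let children := pvSortVals ci.1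
  let indegree := ci.2
  let queue := PySem.List.sorted ((indegree.items.filter (fun p => p.2 == 0)).map (·.1)) (fun x => x) false
  pvTopoLoop d children (2 * branch_parents.length + 2) queue indegree []

-- `_children_map` helper of A
def pvChildrenMap (branch_parents : List (String × Option String)) : PySem.Dict String (List String) :=
  let d := PySem.Dict.ofList branch_parents
  pvSortVals (d.items.foldl
    (fun (cm : PySem.Dict String (List String)) bp =>
      match bp.2 with
      | none => cm
      | some parent => cm.modify parent [] (· ++ [bp.1])) PySem.Dict.empty)

-- A's `while queue:` BFS; fuel bounds the number of pops (each node is enqueued at most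
-- once, so the generous fuel passed below never runs out — proved in the lemmas)
def pvBFS (d : PySem.Dict String (Option String)) (children : PySem.Dict String (List String)) :
    Nat → PySem.Set String → List String → List String → PySem.Set String × List String
  | 0, seen, ordered, _ => (seen, ordered)
  | _ + 1, seen, ordered, [] => (seen, ordered)
  | fuel + 1, seen, ordered, branch :: queue =>
    if branch ∈ seen then pvBFS d children fuel seen ordered queue
    else
      let seen' := PySem.Set.add seen branch
      let ordered' := if d.contains branch then ordered ++ [branch] else ordered
      let queue' := queue ++ (children.getD branch []).filter (fun c => !(PySem.Set.contains seen' c))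
      pvBFS d children fuel seen' ordered' queue'

def descendant_closure (seeds : List String) (branch_parents : List (String × Option String)) : List String :=
  let d := PySem.Dict.ofList branch_parents
  let seed_set := PySem.List.dedup seeds                       -- list(dict.fromkeys(seeds))
  let children := pvChildrenMap branch_parents
  let fuel := seeds.length + (seeds.length + branch_parents.length) * (branch_parents.length + 1) + 1
  let res := pvBFS d children fuel PySem.Set.empty [] seed_set
  (topological_order branch_parents).filter (fun b => PySem.Set.contains res.1 b)

-- ===== PORT B =====
-- B's `while i < len(queue):` root-driven BFS of _ordered_branches: pop a node, emit it if it is a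
-- key, enqueue its (sorted, scanned on demand) children; fuel bounds the number of pops
def pvTopoLoopB (d : PySem.Dict String (Option String)) :
    Nat → List String → List String → List String
  | 0, _, ordered => ordered
  | _ + 1, [], ordered => ordered
  | fuel + 1, node :: rest, ordered =>
    let ordered' := if d.contains node then ordered ++ [node] else ordered
    let kids := PySem.List.sorted ((d.items.filter (fun q => q.2 == some node)).map (·.1)) (fun x => x) false
    pvTopoLoopB d fuel (rest ++ kids) ordered'

-- `_ordered_branches` of Source B (its ValueError on a cycle is the raise excluded by Pre_)
def pvOrderedBranches (branch_parents : List (String × Option String)) : List String :=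
  let d := PySem.Dict.ofList branch_parents
  let parents := PySem.Set.ofList (d.values.filterMap (fun p => p))
  let nodes := PySem.Set.union (PySem.Set.ofList d.keys) parents
  let roots := PySem.List.sorted (nodes.filter (fun n => (d.getD n none).isNone)) (fun x => x) false
  pvTopoLoopB d (2 * branch_parents.length + 2) roots []

-- the `while node is not None:` upward walk of Source B; under Pre_ every parent chain from a key
-- dies out within |keys| + 1 steps, so the fuel passed below never runs out
def pvClimb (d : PySem.Dict String (Option String)) (seedSet : PySem.Set String) :
    Nat → Option String → Bool
  | _, none => false
  | 0, some _ => false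
  | fuel + 1, some node =>
    if PySem.Set.contains seedSet node then true
    else pvClimb d seedSet fuel (d.getD node none)

def descendant_closure_alt (seeds : List String) (branch_parents : List (String × Option String)) : List String :=
  let order := pvOrderedBranches branch_parents
  let d := PySem.Dict.ofList branch_parents
  let seedSet := PySem.Set.ofList seeds
  order.foldl (fun result branch =>
    if pvClimb d seedSet (d.keys.length + 1) (some branch) then result ++ [branch] else result) []

-- ===== PRECONDITION & SPEC =====
-- k-fold application of `branch_parents.get(·)` (none both for a missing key and a None parent)
def pvParentIter (d : PySem.Dict String (Option String)) : Nat → String → Option String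
  | 0, x => some x
  | k + 1, x =>
    match d.getD x none with
    | none => none
    | some p => pvParentIter d k p

-- Pre_ excludes exactly the inputs on which Python A raises ValueError: a parent cycle among the
-- keys (on those inputs B raises the same ValueError). Closed form: from every key, the parent
-- chain dies out within |keys| + 1 steps.
def Pre_descendant_closure (seeds : List String) (branch_parents : List (String × Option String)) : Prop :=
  ∀ x ∈ (PySem.Dict.ofList branch_parents).keys,
    pvParentIter (PySem.Dict.ofList branch_parents)
      ((PySem.Dict.ofList branch_parents).keys.length + 1) x = none

instance (seeds : List String) (branch_parents : List (String × Option String)) : Decidable (Pre_descendant_closure seeds branch_parents) := by unfold Pre_descendant_closure; infer_instance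

def pvWitness_descendant_closure : List String × (List (String × Option String)) :=
  (["a"], [("b", some "a"), ("c", some "b"), ("d", none)])

def Spec_descendant_closure (seeds : List String) (branch_parents : List (String × Option String)) (out : List String) : Prop := out = descendant_closure_alt seeds branch_parents
instance (seeds : List String) (branch_parents : List (String × Option String)) (out : List String) : Decidable (Spec_descendant_closure seeds branch_parents out) := by unfold Spec_descendant_closure; infer_instance

-- ===== CLAIM (what is proved, stated in full; the proofs are below) =====
def Claim_equal_descendant_closure : Prop := ∀ (seeds : List String) (branch_parents : List (String × Option String)), Dom_descendant_closure seeds branch_parents → Pre_descendant_closure seeds branch_parents → Spec_descendant_closure seeds branch_parents (descendant_closure seeds branch_parents)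

-- ===== LEMMAS AND PROOFS =====

-- reachability upward through parent chains to a seed
def pvReach (d : PySem.Dict String (Option String)) (seeds : List String) (x : String) : Prop :=
  ∃ k y, pvParentIter d k x = some y ∧ y ∈ seeds

lemma pvParentIter_add (d : PySem.Dict String (Option String)) (a b : Nat) (x : String) :
    pvParentIter d (a + b) x =
      match pvParentIter d a x with
      | none => none
      | some y => pvParentIter d b y := by
  induction a generalizing x with
  | zero => simp [pvParentIter]
  | succ a ih =>
    rw [Nat.add_right_comm]
    rw [pvParentIter, pvParentIter]
    cases hx : d.getD x none with
    | none => simp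
    | some p => simpa using ih p

lemma pvParentIter_lt_of_some (d : PySem.Dict String (Option String)) {k m : Nat} {x y : String}
    (hk : pvParentIter d k x = some y) (hm : pvParentIter d m x = none) : k < m := by
  by_contra h
  have hkm : m + (k - m) = k := by omega
  rw [← hkm, pvParentIter_add, hm] at hk
  simp at hk

-- the value-sorting pass permutes every children list
lemma pvSortVals_getD_perm (ks : List String) (ch : PySem.Dict String (List String)) (p : String) :
    ((ks.foldl (fun d k => d.modify k [] (fun l => PySem.List.sorted l (fun x => x) false)) ch).getD p []).Perm
      (ch.getD p []) := by
  induction ks generalizing ch with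
  | nil => simp
  | cons k ks ih =>
    simp only [List.foldl_cons]
    refine (ih _).trans ?_
    rw [PySem.Dict.getD_modify]
    by_cases hpk : p = k
    · subst hpk; simp [PySem.List.sorted_perm]
    · simp [hpk]

-- with distinct keys the value-sorting pass sorts the value at every key it visits
lemma pvSortVals_getD_of_nodup (ks : List String) (ch : PySem.Dict String (List String)) (p : String)
    (hnd : ks.Nodup) :
    ((ks.foldl (fun d k => d.modify k [] (fun l => PySem.List.sorted l (fun x => x) false)) ch).getD p [])
      = if p ∈ ks then PySem.List.sorted (ch.getD p []) (fun x => x) false else ch.getD p [] := by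
  induction ks generalizing ch with
  | nil => simp
  | cons k ks ih =>
    simp only [List.foldl_cons]
    rw [ih _ hnd.of_cons]
    by_cases hpks : p ∈ ks
    · have hpk : p ≠ k := by rintro rfl; exact (List.nodup_cons.1 hnd).1 hpks
      rw [PySem.Dict.getD_modify, if_neg hpk]
      simp [hpks, List.mem_cons, hpk]
    · by_cases hpk : p = k
      · subst hpk
        rw [if_neg hpks, PySem.Dict.getD_modify, if_pos rfl]
        simp
      · rw [if_neg hpks, PySem.Dict.getD_modify, if_neg hpk]
        simp [List.mem_cons, hpk, hpks]

-- the children-building fold groups each key under its parent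
lemma pvChildrenFold_getD (l : List (String × Option String))
    (cm : PySem.Dict String (List String)) (p : String) :
    (l.foldl (fun cm bp => match bp.2 with
        | none => cm
        | some parent => cm.modify parent [] (· ++ [bp.1])) cm).getD p []
      = cm.getD p [] ++ (l.filter (fun q => q.2 == some p)).map (·.1) := by
  induction l generalizing cm with
  | nil => simp
  | cons q l ih =>
    obtain ⟨c, po⟩ := q
    cases po with
    | none => simp only [List.foldl_cons]; rw [ih]; simp
    | some par =>
      simp only [List.foldl_cons]
      rw [ih, PySem.Dict.getD_modify]
      by_cases hp : p = par
      · subst hp; simp [List.append_assoc]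
      · have hb : ((some par : Option String) == some p) = false := by
          simp; exact fun h => hp h.symm
        simp [hp, hb]

-- the children-building fold keeps the key list duplicate-free
lemma pvChildrenFold_nodup_keys (l : List (String × Option String)) :
    ∀ (cm : PySem.Dict String (List String)), cm.keys.Nodup →
    (l.foldl (fun cm bp => match bp.2 with
        | none => cm
        | some parent => cm.modify parent [] (· ++ [bp.1])) cm).keys.Nodup := by
  induction l with
  | nil => intro cm h; simpa using h
  | cons q l ih =>
    intro cm h
    obtain ⟨c, po⟩ := q
    cases po with
    | none => simpa using ih cm h
    | some par =>
      simp only [List.foldl_cons]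
      apply ih
      rw [PySem.Dict.keys_modify]
      · exact PySem.Dict.nodup_keys_insert _ _ _ h

-- the children lists are a permutation of "keys whose parent is p, in items order"
lemma pvChildrenMap_getD_perm (branch_parents : List (String × Option String)) (p : String) :
    ((pvChildrenMap branch_parents).getD p []).Perm
      (((PySem.Dict.ofList branch_parents).items.filter (fun q => q.2 == some p)).map (·.1)) := by
  unfold pvChildrenMap pvSortVals
  refine (pvSortVals_getD_perm _ _ _).trans ?_
  rw [pvChildrenFold_getD, PySem.Dict.getD_empty]
  simp

-- membership in the children map: c is a child of p iff c is a key with parent p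
lemma pvChildrenMap_mem (branch_parents : List (String × Option String)) (c p : String) :
    c ∈ (pvChildrenMap branch_parents).getD p [] ↔
      (PySem.Dict.ofList branch_parents).getD c none = some p := by
  rw [(pvChildrenMap_getD_perm branch_parents p).mem_iff]
  have hnd := PySem.Dict.nodup_keys_ofList branch_parents
  constructor
  · intro h
    rcases List.mem_map.1 h with ⟨q, hq, hq1⟩
    rcases List.mem_filter.1 hq with ⟨hqi, hq2⟩
    have hq2' : q.2 = some p := by simpa using hq2
    have : q = (c, some p) := by
      obtain ⟨q1, q2⟩ := q; simp_all
    subst this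
    have := (PySem.Dict.get?_eq_some_iff_mem_items _ c (some p) hnd).2 hqi
    rw [PySem.Dict.getD_eq_get?_getD, this]; rfl
  · intro h
    rw [PySem.Dict.getD_eq_get?_getD] at h
    cases hg : (PySem.Dict.ofList branch_parents).get? c with
    | none => rw [hg] at h; simp at h
    | some v =>
      rw [hg] at h; simp at h; subst h
      have hmem := (PySem.Dict.get?_eq_some_iff_mem_items _ c (some p) hnd).1 hg
      exact List.mem_map.2 ⟨(c, some p), List.mem_filter.2 ⟨hmem, by simp⟩, rfl⟩

-- every children list is a duplicate-free list of keys
lemma pvChildrenMap_nodup (branch_parents : List (String × Option String)) (p : String) :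
    ((pvChildrenMap branch_parents).getD p []).Nodup := by
  refine (pvChildrenMap_getD_perm branch_parents p).nodup_iff.2 ?_
  have hsub : ((((PySem.Dict.ofList branch_parents).items.filter
      (fun q => q.2 == some p)).map (·.1)) : List String).Sublist
      ((PySem.Dict.ofList branch_parents).items.map (·.1)) :=
    List.Sublist.map _ List.filter_sublist
  exact hsub.nodup (PySem.Dict.nodup_keys_ofList branch_parents)

-- every children list of A's map is strictly increasing
lemma pvChildrenMap_pairwise_lt (branch_parents : List (String × Option String)) (p : String) :
    ((pvChildrenMap branch_parents).getD p []).Pairwise (fun a b => a < b) := by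
  have hle : ((pvChildrenMap branch_parents).getD p []).Pairwise (fun a b => a ≤ b) := by
    unfold pvChildrenMap pvSortVals
    set grouped := ((PySem.Dict.ofList branch_parents).items.foldl
      (fun cm bp => match bp.2 with
        | none => cm
        | some parent => cm.modify parent [] (· ++ [bp.1])) PySem.Dict.empty) with hg
    have hnd : grouped.keys.Nodup :=
      pvChildrenFold_nodup_keys _ _ (by simp)
    rw [pvSortVals_getD_of_nodup _ _ _ hnd]
    by_cases hp : p ∈ grouped.keys
    · rw [if_pos hp]
      exact PySem.List.sorted_pairwise _ _
    · rw [if_neg hp]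
      have : grouped.getD p [] = [] := by
        apply PySem.Dict.getD_of_not_contains
        cases hc : grouped.contains p
        · rfl
        · exact absurd ((PySem.Dict.contains_iff_mem_keys _ _).1 hc) hp
      rw [this]; exact List.Pairwise.nil
  have hne := pvChildrenMap_nodup branch_parents p
  exact (hle.and hne).imp (fun h => lt_of_le_of_ne h.1 h.2)

-- B's on-demand sorted child scan computes exactly A's children list
lemma pvKids_eq (branch_parents : List (String × Option String)) (b : String) :
    PySem.List.sorted (((PySem.Dict.ofList branch_parents).items.filter
        (fun q => q.2 == some b)).map (·.1)) (fun x => x) false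
      = (pvChildrenMap branch_parents).getD b [] := by
  exact PySem.List.sorted_eq_of_perm_of_pairwise_lt _ _ _
    (pvChildrenMap_getD_perm branch_parents b) (pvChildrenMap_pairwise_lt branch_parents b)

-- climb returns true iff some parent chain of length < fuel reaches a seed
lemma pvClimb_iff (d : PySem.Dict String (Option String)) (ss : PySem.Set String)
    (fuel : Nat) (x : String) :
    pvClimb d ss fuel (some x) = true ↔
      ∃ k y, k < fuel ∧ pvParentIter d k x = some y ∧ y ∈ ss := by
  induction fuel generalizing x with
  | zero => simp [pvClimb]
  | succ fuel ih =>
    rw [pvClimb]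
    by_cases hx : x ∈ ss
    · simp only [(PySem.Set.contains_iff ss x).2 hx, if_true]
      constructor
      · intro _; exact ⟨0, x, Nat.succ_pos _, rfl, hx⟩
      · intro _; trivial
    · have hc : PySem.Set.contains ss x = false := by
        cases h : PySem.Set.contains ss x
        · rfl
        · exact absurd ((PySem.Set.contains_iff ss x).1 h) hx
      simp only [hc, Bool.false_eq_true, if_false]
      cases hp : d.getD x none with
      | none =>
        simp only [pvClimb]
        constructor
        · intro h; exact absurd h (by simp)
        · rintro ⟨k, y, hk, hit, hy⟩
          cases k with
          | zero => simp only [pvParentIter] at hit; cases hit; exact absurd hy hx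
          | succ k => rw [pvParentIter, hp] at hit; simp at hit
      | some p =>
        rw [ih p]
        constructor
        · rintro ⟨k, y, hk, hit, hy⟩
          exact ⟨k + 1, y, Nat.succ_lt_succ hk, by rw [pvParentIter, hp]; exact hit, hy⟩
        · rintro ⟨k, y, hk, hit, hy⟩
          cases k with
          | zero => simp only [pvParentIter] at hit; cases hit; exact absurd hy hx
          | succ k =>
            rw [pvParentIter, hp] at hit
            exact ⟨k, y, Nat.lt_of_succ_lt_succ hk, hit, hy⟩

-- pointwise-weaker filters keep no fewer elements
lemma pvFilter_length_le {α : Type} {p q : α → Bool} (u : List α)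
    (himp : ∀ x ∈ u, q x = true → p x = true) :
    (u.filter q).length ≤ (u.filter p).length := by
  induction u with
  | nil => simp
  | cons a u ih =>
    have himp' : ∀ x ∈ u, q x = true → p x = true := fun x hx => himp x (List.mem_cons_of_mem a hx)
    rw [List.filter_cons, List.filter_cons]
    cases hqa : q a with
    | true => rw [himp a List.mem_cons_self hqa]; simpa using ih himp'
    | false =>
      cases hpa : p a with
      | true => exact Nat.le_succ_of_le (ih himp')
      | false => simpa using ih himp'

-- filtering by a strictly stronger predicate that loses a witness shortens the list
lemma pvFilter_length_lt {α : Type} {p q : α → Bool} {u : List α}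
    (himp : ∀ x ∈ u, q x = true → p x = true) {b : α} (hb : b ∈ u)
    (hpb : p b = true) (hqb : q b = false) :
    (u.filter q).length < (u.filter p).length := by
  induction u with
  | nil => cases hb
  | cons a u ih =>
    have himp' : ∀ x ∈ u, q x = true → p x = true := fun x hx => himp x (List.mem_cons_of_mem a hx)
    rcases List.mem_cons.1 hb with rfl | hb'
    · rw [List.filter_cons, List.filter_cons, hpb, hqb]
      simpa using Nat.lt_succ_of_le (pvFilter_length_le u himp')
    · rw [List.filter_cons, List.filter_cons]
      cases hqa : q a with
      | true => rw [himp a List.mem_cons_self hqa]; simpa using ih himp' hb'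
      | false =>
        cases hpa : p a with
        | true => exact Nat.lt_succ_of_lt (ih himp' hb')
        | false => simpa using ih himp' hb'

-- a stronger filter plus a disjoint duplicate-free batch of kept witnesses fits inside the weaker filter
lemma pvFilter_length_add_le {α : Type} [DecidableEq α] {p q : α → Bool} {u K : List α}
    (hu : u.Nodup) (hK : K.Nodup) (hKu : ∀ c ∈ K, c ∈ u)
    (himp : ∀ x ∈ u, q x = true → p x = true)
    (hKp : ∀ c ∈ K, p c = true) (hKq : ∀ c ∈ K, q c = false) :
    (u.filter q).length + K.length ≤ (u.filter p).length := by
  have hnd : ((u.filter q) ++ K).Nodup := by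
    rw [List.nodup_append]
    refine ⟨hu.filter _, hK, ?_⟩
    intro a ha b hb hab
    subst hab
    have := (List.mem_filter.1 ha).2
    rw [hKq a hb] at this
    cases this
  have hsub : ∀ x ∈ (u.filter q) ++ K, x ∈ u.filter p := by
    intro x hx
    rcases List.mem_append.1 hx with h | h
    · rcases List.mem_filter.1 h with ⟨h1, h2⟩
      exact List.mem_filter.2 ⟨h1, himp x h1 h2⟩
    · exact List.mem_filter.2 ⟨hKu x h, hKp x h⟩
  have := (List.subperm_of_subset hnd hsub).length_le
  simpa using this

-- the BFS master lemma: progress (everything seen or queued ends up seen), closure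
-- (final seen is closed under children) and soundness (final seen satisfies any
-- invariant R closed under children), provided the fuel dominates the potential
lemma pvBFS_main (ch : PySem.Dict String (List String)) (d : PySem.Dict String (Option String))
    (u : List String) (klen : Nat) (R : String → Prop)
    (hchu : ∀ b c, c ∈ ch.getD b [] → c ∈ u)
    (hchlen : ∀ b, (ch.getD b []).length ≤ klen)
    (hR : ∀ b c, R b → c ∈ ch.getD b [] → R c) :
    ∀ (fuel : Nat) (seen : PySem.Set String) (queue ordered : List String),
    (∀ x ∈ queue, x ∈ u) →
    (queue.length + (u.filter (fun z => !(PySem.Set.contains seen z))).length * (klen + 1) < fuel) →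
    (∀ x ∈ seen, ∀ c ∈ ch.getD x [], c ∈ seen ∨ c ∈ queue) →
    (∀ x ∈ seen, R x) → (∀ x ∈ queue, R x) →
    (∀ x, (x ∈ seen ∨ x ∈ queue) → x ∈ (pvBFS d ch fuel seen ordered queue).1)
    ∧ (∀ x ∈ (pvBFS d ch fuel seen ordered queue).1,
        ∀ c ∈ ch.getD x [], c ∈ (pvBFS d ch fuel seen ordered queue).1)
    ∧ (∀ x ∈ (pvBFS d ch fuel seen ordered queue).1, R x) := by
  intro fuel
  induction fuel with
  | zero =>
    intro seen queue ordered _ hfuel _ _ _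
    exact absurd hfuel (Nat.not_lt_zero _)
  | succ fuel ih =>
    intro seen queue ordered hq hfuel hclosed hseenR hqR
    cases queue with
    | nil =>
      rw [pvBFS]
      refine ⟨?_, ?_, hseenR⟩
      · intro x hx
        rcases hx with h | h
        · exact h
        · cases h
      · intro x hx c hc
        rcases hclosed x hx c hc with h | h
        · exact h
        · cases h
    | cons b queue =>
      rw [pvBFS]
      by_cases hb : b ∈ seen
      · rw [if_pos hb]
        have hq' : ∀ x ∈ queue, x ∈ u := fun x hx => hq x (List.mem_cons_of_mem _ hx)
        have hfuel' : queue.length +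
            (u.filter (fun z => !(PySem.Set.contains seen z))).length * (klen + 1) < fuel := by
          simp only [List.length_cons] at hfuel; omega
        have hclosed' : ∀ x ∈ seen, ∀ c ∈ ch.getD x [], c ∈ seen ∨ c ∈ queue := by
          intro x hx c hc
          rcases hclosed x hx c hc with h | h
          · exact Or.inl h
          · rcases List.mem_cons.1 h with rfl | h2
            · exact Or.inl hb
            · exact Or.inr h2
        obtain ⟨c1, c2, c3⟩ := ih seen queue ordered hq' hfuel' hclosed' hseenR
          (fun x hx => hqR x (List.mem_cons_of_mem _ hx))
        refine ⟨?_, c2, c3⟩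
        intro x hx
        apply c1
        rcases hx with h | h
        · exact Or.inl h
        · rcases List.mem_cons.1 h with rfl | h2
          · exact Or.inl hb
          · exact Or.inr h2
      · rw [if_neg hb]
        dsimp only
        have hbu : b ∈ u := hq b List.mem_cons_self
        have hmem_add : ∀ y, y ∈ PySem.Set.add seen b ↔ y ∈ seen ∨ y = b :=
          fun y => PySem.Set.mem_add seen b y
        have hnotmem : ∀ c, (!(PySem.Set.contains (PySem.Set.add seen b) c)) = true ↔
            c ∉ PySem.Set.add seen b := by
          intro c
          cases h : PySem.Set.contains (PySem.Set.add seen b) c with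
          | false =>
            simp only [Bool.not_false]
            exact iff_of_true (by simp) (fun hmem => by
              rw [(PySem.Set.contains_iff _ c).2 hmem] at h; cases h)
          | true =>
            simp only [Bool.not_true]
            exact iff_of_false (by simp) (fun hno => hno ((PySem.Set.contains_iff _ c).1 h))
        have hq' : ∀ x ∈ queue ++ (ch.getD b []).filter
            (fun c => !(PySem.Set.contains (PySem.Set.add seen b) c)), x ∈ u := by
          intro x hx
          rcases List.mem_append.1 hx with h | h
          · exact hq x (List.mem_cons_of_mem _ h)
          · exact hchu b x (List.mem_filter.1 h).1
        have hV : (u.filter (fun z => !(PySem.Set.contains (PySem.Set.add seen b) z))).length + 1 ≤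
            (u.filter (fun z => !(PySem.Set.contains seen z))).length := by
          refine pvFilter_length_lt ?_ hbu ?_ ?_
          · intro x _ hx
            have hxn : x ∉ PySem.Set.add seen b := (hnotmem x).1 hx
            have hxs : x ∉ seen := fun h => hxn ((hmem_add x).2 (Or.inl h))
            have hcf : PySem.Set.contains seen x = false := by
              cases h : PySem.Set.contains seen x
              · rfl
              · exact absurd ((PySem.Set.contains_iff _ x).1 h) hxs
            rw [hcf]; rfl
          · have hcf : PySem.Set.contains seen b = false := by
              cases h : PySem.Set.contains seen b
              · rfl
              · exact absurd ((PySem.Set.contains_iff _ b).1 h) hb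
            rw [hcf]; rfl
          · have hct : PySem.Set.contains (PySem.Set.add seen b) b = true :=
              (PySem.Set.contains_iff _ b).2 ((hmem_add b).2 (Or.inr rfl))
            rw [hct]; rfl
        have hfuel' : (queue ++ (ch.getD b []).filter
            (fun c => !(PySem.Set.contains (PySem.Set.add seen b) c))).length +
            (u.filter (fun z => !(PySem.Set.contains (PySem.Set.add seen b) z))).length * (klen + 1)
            < fuel := by
          rw [List.length_append]
          have h2 : ((ch.getD b []).filter
              (fun c => !(PySem.Set.contains (PySem.Set.add seen b) c))).length ≤ klen :=
            le_trans (List.length_filter_le _ _) (hchlen b)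
          have h3 : ((u.filter (fun z => !(PySem.Set.contains (PySem.Set.add seen b) z))).length + 1)
              * (klen + 1) ≤
              (u.filter (fun z => !(PySem.Set.contains seen z))).length * (klen + 1) :=
            Nat.mul_le_mul_right _ hV
          rw [Nat.succ_mul] at h3
          simp only [List.length_cons] at hfuel
          linarith
        have hclosed' : ∀ x ∈ PySem.Set.add seen b, ∀ c ∈ ch.getD x [],
            c ∈ PySem.Set.add seen b ∨ c ∈ queue ++ (ch.getD b []).filter
              (fun c => !(PySem.Set.contains (PySem.Set.add seen b) c)) := by
          intro x hx c hc
          rcases (hmem_add x).1 hx with hxs | rfl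
          · rcases hclosed x hxs c hc with h | h
            · exact Or.inl ((hmem_add c).2 (Or.inl h))
            · rcases List.mem_cons.1 h with rfl | h2
              · exact Or.inl ((hmem_add c).2 (Or.inr rfl))
              · exact Or.inr (List.mem_append.2 (Or.inl h2))
          · by_cases hcs : c ∈ PySem.Set.add seen x
            · exact Or.inl hcs
            · exact Or.inr (List.mem_append.2 (Or.inr
                (List.mem_filter.2 ⟨hc, (hnotmem c).2 hcs⟩)))
        have hseenR' : ∀ x ∈ PySem.Set.add seen b, R x := by
          intro x hx
          rcases (hmem_add x).1 hx with h | rfl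
          · exact hseenR x h
          · exact hqR x List.mem_cons_self
        have hqR' : ∀ x ∈ queue ++ (ch.getD b []).filter
            (fun c => !(PySem.Set.contains (PySem.Set.add seen b) c)), R x := by
          intro x hx
          rcases List.mem_append.1 hx with h | h
          · exact hqR x (List.mem_cons_of_mem _ h)
          · exact hR b x (hqR b List.mem_cons_self) (List.mem_filter.1 h).1
        obtain ⟨c1, c2, c3⟩ := ih (PySem.Set.add seen b) _ _ hq' hfuel' hclosed' hseenR' hqR'
        refine ⟨?_, c2, c3⟩
        intro x hx
        apply c1
        rcases hx with h | h
        · exact Or.inl ((hmem_add x).2 (Or.inl h))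
        · rcases List.mem_cons.1 h with rfl | h2
          · exact Or.inl ((hmem_add x).2 (Or.inr rfl))
          · exact Or.inr (List.mem_append.2 (Or.inl h2))

-- every member of B's order is a key
lemma pvTopoLoopB_mem (d : PySem.Dict String (Option String)) :
    ∀ (fuel : Nat) (queue ordered : List String),
    (∀ x ∈ ordered, x ∈ d.keys) →
    ∀ x ∈ pvTopoLoopB d fuel queue ordered, x ∈ d.keys := by
  intro fuel
  induction fuel with
  | zero => intro queue ordered h; simpa [pvTopoLoopB] using h
  | succ fuel ih =>
    intro queue ordered h
    cases queue with
    | nil => simpa [pvTopoLoopB] using h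
    | cons b q =>
      rw [pvTopoLoopB]
      apply ih
      intro x hx
      by_cases hb : d.contains b
      · simp only [hb, if_true] at hx
        rcases List.mem_append.1 hx with h1 | h1
        · exact h x h1
        · rcases List.mem_singleton.1 h1 with rfl
          exact (PySem.Dict.contains_iff_mem_keys d x).1 hb
      · simp only [hb, Bool.false_eq_true, if_false] at hx
        exact h x hx

-- a parent pointing into S pulls its children into S: upward reachability implies BFS membership
lemma pvParentIter_reach_mem (branch_parents : List (String × Option String)) (seeds : List String)
    (S : List String)
    (hseed : ∀ x ∈ seeds, x ∈ S)
    (hcl : ∀ p ∈ S, ∀ c, (PySem.Dict.ofList branch_parents).getD c none = some p → c ∈ S) :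
    ∀ (k : Nat) (x y : String),
      pvParentIter (PySem.Dict.ofList branch_parents) k x = some y → y ∈ seeds → x ∈ S := by
  intro k
  induction k with
  | zero =>
    intro x y h hy
    rw [pvParentIter] at h
    cases h
    exact hseed _ hy
  | succ k ih =>
    intro x y h hy
    rw [pvParentIter] at h
    cases hp : (PySem.Dict.ofList branch_parents).getD x none with
    | none => rw [hp] at h; simp at h
    | some p =>
      rw [hp] at h
      exact hcl p (ih p y h hy) x hp

-- a node with a parent entry is a key
lemma pvKey_of_parent (branch_parents : List (String × Option String)) (c p : String)
    (h : (PySem.Dict.ofList branch_parents).getD c none = some p) :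
    c ∈ (PySem.Dict.ofList branch_parents).keys := by
  by_contra hnc
  rw [PySem.Dict.getD_eq_get?_getD,
    (PySem.Dict.get?_eq_none_iff_not_mem_keys _ c).2 hnc] at h
  simp at h

lemma pvKeys_length_le (branch_parents : List (String × Option String)) :
    (PySem.Dict.ofList branch_parents).keys.length ≤ branch_parents.length := by
  have h := PySem.Dict.keys_foldl_insert_key (ν := Option String) branch_parents
    (fun q => q.1) (fun _ q => q.2) PySem.Dict.empty
  have h2 : (PySem.Dict.ofList branch_parents).keys =
      PySem.Set.update PySem.Dict.empty.keys (branch_parents.map (fun q => q.1)) := h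
  rw [h2, PySem.Dict.keys_empty]
  calc (PySem.Set.update ([] : PySem.Set String) (branch_parents.map (fun q => q.1))).length
      = (PySem.Set.ofList (branch_parents.map (fun q => q.1))).length := rfl
    _ ≤ (branch_parents.map (fun q => q.1)).length := PySem.Set.length_ofList_le _
    _ = branch_parents.length := List.length_map ..

-- A's combined children/indegree loop is the pair of its two component loops
lemma pvCI_eq (l : List (String × Option String)) (c0 : PySem.Dict String (List String))
    (i0 : PySem.Dict String Int) :
    l.foldl (fun (s : PySem.Dict String (List String) × PySem.Dict String Int) bp =>
      match bp.2 with
      | none => s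
      | some parent =>
        let children := s.1.modify parent [] (· ++ [bp.1])
        let indeg := s.2.setdefault parent 0
        let indeg := indeg.insert bp.1 (indeg.getD bp.1 0 + 1)
        (children, indeg)) (c0, i0)
    = (l.foldl (fun cm bp => match bp.2 with
        | none => cm
        | some parent => cm.modify parent [] (· ++ [bp.1])) c0,
       l.foldl (fun ind (bp : String × Option String) => match bp.2 with
        | none => ind
        | some parent =>
          let i1 := ind.setdefault parent 0
          i1.insert bp.1 (i1.getD bp.1 0 + 1)) i0) := by
  induction l generalizing c0 i0 with
  | nil => rfl
  | cons q l ih =>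
    obtain ⟨c, po⟩ := q
    cases po with
    | none => simpa using ih c0 i0
    | some par => simpa using ih _ _

-- setdefault with default-equal value never changes a `getD · 0` lookup
lemma pvGetD0_setdefault (d : PySem.Dict String Int) (p x : String) :
    (d.setdefault p 0).getD x 0 = d.getD x 0 := by
  by_cases hxp : x = p
  · subst hxp; rw [PySem.Dict.getD_setdefault_self]
  · rw [PySem.Dict.getD_eq_get?_getD, PySem.Dict.get?_setdefault_of_ne _ _ hxp,
      ← PySem.Dict.getD_eq_get?_getD]

-- the indegree loop counts, for each x, the items that carry key x with a non-None parent
lemma pvIndeg_getD (l : List (String × Option String)) :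
    ∀ (ind : PySem.Dict String Int) (x : String),
    (l.foldl (fun ind (bp : String × Option String) => match bp.2 with
        | none => ind
        | some parent =>
          let i1 := ind.setdefault parent 0
          i1.insert bp.1 (i1.getD bp.1 0 + 1)) ind).getD x 0
      = ind.getD x 0 + ((l.filter (fun q => q.1 == x && q.2.isSome)).length : Int) := by
  induction l with
  | nil => intro ind x; simp
  | cons q l ih =>
    intro ind x
    obtain ⟨c, po⟩ := q
    cases po with
    | none => rw [List.foldl_cons]; simp only []; rw [ih]; simp
    | some par =>
      rw [List.foldl_cons]
      simp only []
      rw [ih, PySem.Dict.getD_insert]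
      by_cases hxc : x = c
      · subst hxc
        rw [if_pos rfl, pvGetD0_setdefault]
        rw [List.filter_cons]
        simp only [BEq.rfl, Option.isSome_some, Bool.and_true, if_pos]
        push_cast [List.length_cons]
        ring
      · rw [if_neg hxc, pvGetD0_setdefault]
        rw [List.filter_cons]
        have : ((c == x) && (some par : Option String).isSome) = false := by
          simp [Ne.symm hxc]
        rw [this]
        simp

-- membership in the indegree loop's key list
lemma pvIndeg_mem_keys (l : List (String × Option String)) :
    ∀ (ind : PySem.Dict String Int) (x : String),
    (x ∈ (l.foldl (fun ind (bp : String × Option String) => match bp.2 with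
        | none => ind
        | some parent =>
          let i1 := ind.setdefault parent 0
          i1.insert bp.1 (i1.getD bp.1 0 + 1)) ind).keys)
      ↔ x ∈ ind.keys ∨ (∃ c po, (c, po) ∈ l ∧ po.isSome ∧ (c = x ∨ po = some x)) := by
  induction l with
  | nil => intro ind x; simp
  | cons q l ih =>
    intro ind x
    obtain ⟨c, po⟩ := q
    cases po with
    | none =>
      rw [List.foldl_cons]; simp only []
      rw [ih]
      constructor
      · rintro (h | ⟨c', po', hm, hs, hx⟩)
        · exact Or.inl h
        · exact Or.inr ⟨c', po', List.mem_cons_of_mem _ hm, hs, hx⟩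
      · rintro (h | ⟨c', po', hm, hs, hx⟩)
        · exact Or.inl h
        · rcases List.mem_cons.1 hm with heq | hm'
          · cases heq; simp at hs
          · exact Or.inr ⟨c', po', hm', hs, hx⟩
    | some par =>
      rw [List.foldl_cons]; simp only []
      rw [ih, PySem.Dict.mem_keys_insert]
      have hsd : x ∈ (ind.setdefault par 0).keys ↔ x = par ∨ x ∈ ind.keys := by
        rw [← PySem.Dict.contains_iff_mem_keys, PySem.Dict.contains_setdefault,
          ← PySem.Dict.contains_iff_mem_keys]
        simp [Bool.or_eq_true]
      rw [hsd]
      constructor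
      · rintro ((h1 | h2 | h3) | ⟨c', po', hm, hs, hx⟩)
        · exact Or.inr ⟨c, some par, List.mem_cons_self, rfl, Or.inl h1.symm⟩
        · exact Or.inr ⟨c, some par, List.mem_cons_self, rfl, Or.inr (by rw [h2])⟩
        · exact Or.inl h3
        · exact Or.inr ⟨c', po', List.mem_cons_of_mem _ hm, hs, hx⟩
      · rintro (h | ⟨c', po', hm, hs, hx⟩)
        · exact Or.inl (Or.inr (Or.inr h))
        · rcases List.mem_cons.1 hm with heq | hm'
          · have h1 : c' = c := (Prod.ext_iff.1 heq).1
            have h2 : po' = some par := (Prod.ext_iff.1 heq).2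
            rcases hx with h3 | h3
            · exact Or.inl (Or.inl (h1 ▸ h3).symm)
            · have : par = x := Option.some.inj (h2.symm.trans h3)
              exact Or.inl (Or.inr (Or.inl this.symm))
          · exact Or.inr ⟨c', po', hm', hs, hx⟩

-- the indegree loop keeps key lists duplicate-free
lemma pvIndeg_nodup (l : List (String × Option String)) :
    ∀ (ind : PySem.Dict String Int), ind.keys.Nodup →
    (l.foldl (fun ind (bp : String × Option String) => match bp.2 with
        | none => ind
        | some parent =>
          let i1 := ind.setdefault parent 0
          i1.insert bp.1 (i1.getD bp.1 0 + 1)) ind).keys.Nodup := by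
  induction l with
  | nil => intro ind h; simpa using h
  | cons q l ih =>
    intro ind h
    obtain ⟨c, po⟩ := q
    cases po with
    | none => rw [List.foldl_cons]; exact ih ind h
    | some par =>
      rw [List.foldl_cons]
      apply ih
      apply PySem.Dict.nodup_keys_insert
      rw [PySem.Dict.keys_setdefault]
      split
      · exact h
      · next hc =>
        rw [List.nodup_append]
        refine ⟨h, List.nodup_singleton _, ?_⟩
        intro a ha b hb hab
        rcases List.mem_singleton.1 hb with rfl
        subst hab
        exact hc (by rw [PySem.Dict.contains_iff_mem_keys]; exact ha)

-- the initial all-zero indegree dict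
lemma pvIndeg0_getD (ks : List String) :
    ∀ (m : PySem.Dict String Int), (∀ y, m.getD y 0 = 0) →
    ∀ x, (ks.foldl (fun m b => m.insert b 0) m).getD x 0 = 0 := by
  induction ks with
  | nil => intro m hm x; exact hm x
  | cons k ks ih =>
    intro m hm x
    rw [List.foldl_cons]
    apply ih
    intro y
    rw [PySem.Dict.getD_insert]
    by_cases hyk : y = k
    · simp [hyk]
    · simp [hyk, hm y]

lemma pvIndeg0_keys (ks : List String) (hnd : ks.Nodup) :
    (ks.foldl (fun (m : PySem.Dict String Int) b => m.insert b 0) PySem.Dict.empty).keys = ks := by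
  have h := PySem.Dict.keys_foldl_insert (ν := Int) ks (fun _ _ => 0) PySem.Dict.empty
  rw [h, PySem.Dict.keys_empty, PySem.Set.update_nil_left, PySem.Set.ofList_eq_self_of_nodup _ hnd]

-- proof-only names for the dicts and lists topological_order builds internally
def pvIndegOf (bp : List (String × Option String)) : PySem.Dict String Int :=
  (PySem.Dict.ofList bp).items.foldl (fun ind (q : String × Option String) => match q.2 with
    | none => ind
    | some parent =>
      let i1 := ind.setdefault parent 0
      i1.insert q.1 (i1.getD q.1 0 + 1))
    ((PySem.Dict.ofList bp).keys.foldl (fun m b => m.insert b 0) PySem.Dict.empty)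

def pvNodesOf (bp : List (String × Option String)) : List String :=
  PySem.Set.union (PySem.Set.ofList (PySem.Dict.ofList bp).keys)
    (PySem.Set.ofList ((PySem.Dict.ofList bp).values.filterMap (fun p => p)))

def pvRootsB (bp : List (String × Option String)) : List String :=
  PySem.List.sorted ((pvNodesOf bp).filter
    (fun n => ((PySem.Dict.ofList bp).getD n none).isNone)) (fun x => x) false

lemma pvTopoB_eq (bp : List (String × Option String)) :
    pvOrderedBranches bp
      = pvTopoLoopB (PySem.Dict.ofList bp) (2 * bp.length + 2) (pvRootsB bp) [] := rfl

lemma pvTopoA_eq (bp : List (String × Option String)) :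
    topological_order bp
      = pvTopoLoop (PySem.Dict.ofList bp) (pvChildrenMap bp) (2 * bp.length + 2)
          (PySem.List.sorted (((pvIndegOf bp).items.filter (fun p => p.2 == 0)).map (·.1))
            (fun x => x) false)
          (pvIndegOf bp) [] := by
  simp only [topological_order, pvCI_eq, pvChildrenMap, pvIndegOf]

-- a dict with distinct keys maps x to 0 iff x is a key whose stored value is 0
lemma pvGet?_zero_iff (m : PySem.Dict String Int) (_hnd : m.keys.Nodup) (x : String) :
    m.get? x = some 0 ↔ x ∈ m.keys ∧ m.getD x 0 = 0 := by
  cases hg : m.get? x with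
  | none =>
    constructor
    · intro h; cases h
    · rintro ⟨hk, _⟩
      rw [PySem.Dict.get?_eq_none_iff_not_mem_keys] at hg
      exact absurd hk hg
  | some v =>
    constructor
    · intro h
      have hv : v = 0 := by simpa using h
      subst hv
      refine ⟨?_, ?_⟩
      · by_contra hk
        rw [(PySem.Dict.get?_eq_none_iff_not_mem_keys m x).2 hk] at hg
        cases hg
      · rw [PySem.Dict.getD_eq_get?_getD, hg]; rfl
    · rintro ⟨hk, h0⟩
      rw [PySem.Dict.getD_eq_get?_getD, hg] at h0
      simp only [Option.getD_some] at h0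
      rw [h0]

-- key-filter of an items list with distinct keys
lemma pvKeyFilterP (l : List (String × Option String)) (x : String) (v : Option String)
    (P : String × Option String → Bool)
    (hnd : (l.map (·.1)).Nodup) (hmem : (x, v) ∈ l) :
    l.filter (fun q => q.1 == x && P q) = if P (x, v) then [(x, v)] else [] := by
  induction l with
  | nil => cases hmem
  | cons q l ih =>
    rw [List.map_cons, List.nodup_cons] at hnd
    by_cases hqx : q.1 = x
    · have hq : q = (x, v) := by
        rcases List.mem_cons.1 hmem with h | h
        · exact h.symm
        · exact absurd (hqx ▸ List.mem_map.2 ⟨(x, v), h, rfl⟩) hnd.1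
      subst hq
      rw [List.filter_cons]
      have hrest : l.filter (fun q => q.1 == x && P q) = [] := by
        apply List.filter_eq_nil_iff.2
        intro a ha
        have : a.1 ≠ x := by
          intro hax
          exact hnd.1 (hax ▸ List.mem_map.2 ⟨a, ha, rfl⟩)
        simp [this]
      simp only [BEq.rfl, Bool.true_and]
      cases hP : P (x, v) <;> simp [hrest]
    · have hmem' : (x, v) ∈ l := by
        rcases List.mem_cons.1 hmem with h | h
        · exact absurd (congrArg (·.1) h.symm) hqx
        · exact h
      rw [List.filter_cons]
      have : (q.1 == x && P q) = false := by simp [hqx]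
      rw [this]
      exact ih hnd.2 hmem'

-- the fully built indegree dict stores 1 at keys with a non-None parent and 0 elsewhere
lemma pvIndegOf_getD (bp : List (String × Option String)) (x : String) :
    (pvIndegOf bp).getD x 0
      = if ((PySem.Dict.ofList bp).getD x none).isSome then 1 else 0 := by
  unfold pvIndegOf
  rw [pvIndeg_getD]
  rw [pvIndeg0_getD _ _ (fun y => by simp) x]
  have hnd : ((PySem.Dict.ofList bp).items.map (·.1)).Nodup :=
    PySem.Dict.nodup_keys_ofList bp
  cases hg : (PySem.Dict.ofList bp).get? x with
  | none =>
    have hnomem : ∀ v, (x, v) ∉ (PySem.Dict.ofList bp).items := by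
      intro v hv
      rw [(PySem.Dict.get?_eq_some_iff_mem_items _ x v hnd).2 hv] at hg
      cases hg
    have hfil : (PySem.Dict.ofList bp).items.filter (fun q => q.1 == x && q.2.isSome) = [] := by
      apply List.filter_eq_nil_iff.2
      intro a ha hcontr
      simp only [Bool.and_eq_true, beq_iff_eq] at hcontr
      exact hnomem a.2 (hcontr.1 ▸ ha)
    rw [hfil, PySem.Dict.getD_eq_get?_getD, hg]
    simp
  | some v =>
    have hmem : (x, v) ∈ (PySem.Dict.ofList bp).items :=
      (PySem.Dict.get?_eq_some_iff_mem_items _ x v hnd).1 hg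
    rw [pvKeyFilterP _ x v (fun q => q.2.isSome) hnd hmem]
    rw [PySem.Dict.getD_eq_get?_getD, hg]
    cases v <;> simp

-- the key list of the fully built indegree dict, as a set: keys plus non-None parents
lemma pvIndegOf_mem_keys (bp : List (String × Option String)) (x : String) :
    x ∈ (pvIndegOf bp).keys ↔
      x ∈ (PySem.Dict.ofList bp).keys
        ∨ ∃ c, (c, some x) ∈ (PySem.Dict.ofList bp).items := by
  unfold pvIndegOf
  rw [pvIndeg_mem_keys]
  rw [pvIndeg0_keys _ (PySem.Dict.nodup_keys_ofList bp)]
  constructor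
  · rintro (h | ⟨c, po, hm, hs, hx⟩)
    · exact Or.inl h
    · rcases hx with rfl | rfl
      · exact Or.inl (PySem.Dict.mem_keys_of_mem_items _ hm)
      · exact Or.inr ⟨c, hm⟩
  · rintro (h | ⟨c, hm⟩)
    · exact Or.inl h
    · exact Or.inr ⟨c, some x, hm, rfl, Or.inr rfl⟩

lemma pvIndegOf_nodup_keys (bp : List (String × Option String)) :
    (pvIndegOf bp).keys.Nodup := by
  unfold pvIndegOf
  apply pvIndeg_nodup
  rw [pvIndeg0_keys _ (PySem.Dict.nodup_keys_ofList bp)]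
  exact PySem.Dict.nodup_keys_ofList bp

lemma pvNodesOf_nodup (bp : List (String × Option String)) : (pvNodesOf bp).Nodup := by
  unfold pvNodesOf
  exact PySem.Set.nodup_union _ _ (PySem.Set.nodup_ofList _)

lemma pvNodesOf_mem (bp : List (String × Option String)) (x : String) :
    x ∈ pvNodesOf bp ↔
      x ∈ (PySem.Dict.ofList bp).keys
        ∨ ∃ c, (c, some x) ∈ (PySem.Dict.ofList bp).items := by
  unfold pvNodesOf
  rw [PySem.Set.mem_union, PySem.Set.mem_ofList, PySem.Set.mem_ofList]
  have : x ∈ (PySem.Dict.ofList bp).values.filterMap (fun p => p)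
      ↔ ∃ c, (c, some x) ∈ (PySem.Dict.ofList bp).items := by
    rw [List.mem_filterMap]
    constructor
    · rintro ⟨po, hpo, h⟩
      subst h
      rcases List.mem_map.1 hpo with ⟨q, hq, hq2⟩
      exact ⟨q.1, by rw [← hq2]; exact hq⟩
    · rintro ⟨c, hm⟩
      exact ⟨some x, List.mem_map.2 ⟨(c, some x), hm, rfl⟩, rfl⟩
  rw [this]

lemma pvNodesOf_length_le (bp : List (String × Option String)) :
    (pvNodesOf bp).length ≤ 2 * bp.length := by
  unfold pvNodesOf
  have hkeys : (PySem.Dict.ofList bp).keys.length ≤ bp.length := pvKeys_length_le bp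
  have hvals : (PySem.Dict.ofList bp).values.length ≤ bp.length := by
    have : (PySem.Dict.ofList bp).values.length = (PySem.Dict.ofList bp).keys.length := by
      simp [PySem.Dict.values, PySem.Dict.keys]
    omega
  have h1 : (PySem.Set.ofList (PySem.Dict.ofList bp).keys).length ≤ bp.length :=
    le_trans (PySem.Set.length_ofList_le _) hkeys
  have h2 : (PySem.Set.ofList ((PySem.Dict.ofList bp).values.filterMap (fun p => p))).length
      ≤ bp.length :=
    le_trans (PySem.Set.length_ofList_le _)
      (le_trans (List.length_filterMap_le _ _) hvals)
  have h3 := PySem.Set.update_eq_append_filter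
    (PySem.Set.ofList (PySem.Dict.ofList bp).keys)
    ((PySem.Set.ofList ((PySem.Dict.ofList bp).values.filterMap (fun p => p))) : List String)
  calc (PySem.Set.union _ _).length
      = ((PySem.Set.ofList (PySem.Dict.ofList bp).keys) ++ _).length := congrArg List.length h3
    _ ≤ bp.length + bp.length := by
        rw [List.length_append]
        refine Nat.add_le_add h1 (le_trans (List.length_filter_le _ _) ?_)
        exact le_trans (PySem.Set.length_ofList_le _) h2
    _ = 2 * bp.length := by omega

-- the two initial queues are the same sorted list
lemma pvRoots_eq (bp : List (String × Option String)) :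
    PySem.List.sorted (((pvIndegOf bp).items.filter (fun p => p.2 == 0)).map (·.1))
        (fun x => x) false
      = pvRootsB bp := by
  unfold pvRootsB
  apply PySem.List.sorted_eq_sorted_of_perm _ _ _ (fun a b h => h)
  have hndA : (((pvIndegOf bp).items.filter (fun p => p.2 == 0)).map (·.1)).Nodup := by
    have hsub : ((((pvIndegOf bp).items.filter (fun p => p.2 == 0)).map (·.1)) : List String).Sublist
        ((pvIndegOf bp).items.map (·.1)) := List.Sublist.map _ List.filter_sublist
    exact hsub.nodup (pvIndegOf_nodup_keys bp)
  have hndB : ((pvNodesOf bp).filter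
      (fun n => ((PySem.Dict.ofList bp).getD n none).isNone)).Nodup :=
    (pvNodesOf_nodup bp).filter _
  rw [List.perm_ext_iff_of_nodup hndA hndB]
  intro x
  have hA : x ∈ (((pvIndegOf bp).items.filter (fun p => p.2 == 0)).map (·.1))
      ↔ (pvIndegOf bp).get? x = some 0 := by
    constructor
    · intro h
      rcases List.mem_map.1 h with ⟨q, hq, hq1⟩
      rcases List.mem_filter.1 hq with ⟨hqi, hq2⟩
      have hq2' : q.2 = 0 := by simpa using hq2
      have : q = (x, 0) := by
        obtain ⟨q1, q2⟩ := q; simp_all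
      subst this
      exact (PySem.Dict.get?_eq_some_iff_mem_items _ x 0 (pvIndegOf_nodup_keys bp)).2 hqi
    · intro h
      have hmem := (PySem.Dict.get?_eq_some_iff_mem_items _ x 0 (pvIndegOf_nodup_keys bp)).1 h
      exact List.mem_map.2 ⟨(x, 0), List.mem_filter.2 ⟨hmem, by simp⟩, rfl⟩
  rw [hA, pvGet?_zero_iff _ (pvIndegOf_nodup_keys bp), List.mem_filter]
  rw [pvIndegOf_getD, pvIndegOf_mem_keys, ← pvNodesOf_mem]
  cases hg : ((PySem.Dict.ofList bp).getD x none) <;> simp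

-- A's inner decrement fold, when every child holds indegree 1, appends all children to the queue
lemma pvDecFold (L : List String) :
    ∀ (ind : PySem.Dict String Int) (q : List String),
    L.Nodup → (∀ c ∈ L, ind.getD c 0 = 1) →
    L.foldl (fun (s : PySem.Dict String Int × List String) child =>
        let ind := s.1.modify child 0 (· - 1)
        let q := if ind.getD child 0 = 0 then s.2 ++ [child] else s.2
        (ind, q)) (ind, q)
      = (L.foldl (fun (i : PySem.Dict String Int) c => i.modify c 0 (· - 1)) ind, q ++ L) := by
  induction L with
  | nil => intro ind q _ _; simp
  | cons c L ih =>
    intro ind q hnd hones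
    rw [List.foldl_cons, List.foldl_cons]
    have hc1 : ind.getD c 0 = 1 := hones c List.mem_cons_self
    have hz : (ind.modify c 0 (· - 1)).getD c 0 = 0 := by
      rw [PySem.Dict.getD_modify_self, hc1]; ring
    simp only [hz]
    rw [ih _ _ hnd.of_cons]
    · simp [List.append_assoc]
    · intro c' hc'
      have hcc' : c' ≠ c := fun h => (List.nodup_cons.1 hnd).1 (h ▸ hc')
      rw [PySem.Dict.getD_modify, if_neg hcc']
      exact hones c' (List.mem_cons_of_mem _ hc')

-- the decrement fold lowers exactly the children's entries by one
lemma pvDecFold_getD (L : List String) (hnd : L.Nodup) :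
    ∀ (ind : PySem.Dict String Int) (x : String),
    (L.foldl (fun (i : PySem.Dict String Int) c => i.modify c 0 (· - 1)) ind).getD x 0
      = if x ∈ L then ind.getD x 0 - 1 else ind.getD x 0 := by
  induction L with
  | nil => intro ind x; simp
  | cons c L ih =>
    intro ind x
    rw [List.foldl_cons, ih (List.nodup_cons.1 hnd).2]
    by_cases hx : x ∈ L
    · have hxc : x ≠ c := fun h => (List.nodup_cons.1 hnd).1 (h ▸ hx)
      rw [if_pos hx, if_pos (List.mem_cons_of_mem _ hx), PySem.Dict.getD_modify, if_neg hxc]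
    · rw [if_neg hx, PySem.Dict.getD_modify]
      by_cases hxc : x = c
      · subst hxc; rw [if_pos rfl, if_pos List.mem_cons_self]
      · rw [if_neg hxc, if_neg (by simp [hxc, hx])]

-- THE LOCK-STEP LEMMA: A's Kahn loop and B's root-driven BFS pop the same nodes in the same
-- order, because every child's indegree entry is 1 until its (unique) parent is popped
lemma pvLoop_eq (d : PySem.Dict String (Option String)) (ch : PySem.Dict String (List String))
    (N : List String) (hN : N.Nodup)
    (hkids_eq : ∀ b, PySem.List.sorted ((d.items.filter (fun q => q.2 == some b)).map (·.1))
        (fun x => x) false = ch.getD b [])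
    (hkidsN : ∀ b c, c ∈ ch.getD b [] → c ∈ N)
    (hkids_par : ∀ b c, c ∈ ch.getD b [] → d.getD c none = some b)
    (hpar_kids : ∀ c p, d.getD c none = some p → c ∈ ch.getD p [])
    (hkids_nodup : ∀ b, (ch.getD b []).Nodup) :
    ∀ (fuelA fuelB : Nat) (P queue : List String) (ind : PySem.Dict String Int)
      (ordered : List String),
    (P ++ queue).Nodup →
    (∀ x ∈ queue, x ∈ N) →
    (∀ c p, d.getD c none = some p → (c ∈ P ∨ c ∈ queue) → p ∈ P) →
    (∀ c p, d.getD c none = some p → ind.getD c 0 = if p ∈ P then 0 else 1) →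
    queue.length + (N.filter (fun x => decide (x ∉ P ++ queue))).length < fuelA →
    queue.length + (N.filter (fun x => decide (x ∉ P ++ queue))).length < fuelB →
    pvTopoLoop d ch fuelA queue ind ordered = pvTopoLoopB d fuelB queue ordered := by
  intro fuelA
  induction fuelA with
  | zero =>
    intro fuelB P queue ind ordered _ _ _ _ hfA _
    exact absurd hfA (Nat.not_lt_zero _)
  | succ fuelA ih =>
    intro fuelB P queue ind ordered hnd hqN hparP hind hfA hfB
    cases fuelB with
    | zero => exact absurd hfB (Nat.not_lt_zero _)
    | succ fuelB =>
      cases queue with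
      | nil => rw [pvTopoLoop, pvTopoLoopB]
      | cons b rest =>
        rw [pvTopoLoop, pvTopoLoopB]
        dsimp only
        rw [hkids_eq b]
        have hcons_eq : P ++ b :: rest = (P ++ [b]) ++ rest := by simp
        have hbP : b ∉ P := by
          rw [List.nodup_append] at hnd
          exact fun hb => hnd.2.2 b hb b List.mem_cons_self rfl
        have hones : ∀ c ∈ ch.getD b [], ind.getD c 0 = 1 := by
          intro c hc
          rw [hind c b (hkids_par b c hc), if_neg hbP]
        rw [pvDecFold _ ind rest (hkids_nodup b) hones]
        have hLdisj : ∀ c ∈ ch.getD b [], c ∉ P ++ b :: rest := by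
          intro c hc hmem
          apply hbP
          apply hparP c b (hkids_par b c hc)
          rcases List.mem_append.1 hmem with h | h
          · exact Or.inl h
          · exact Or.inr h
        -- potential decreases
        have hcount : (N.filter (fun x =>
              decide (x ∉ (P ++ [b]) ++ (rest ++ ch.getD b [])))).length
            + (ch.getD b []).length
            ≤ (N.filter (fun x => decide (x ∉ P ++ b :: rest))).length := by
          apply pvFilter_length_add_le hN (hkids_nodup b) (hkidsN b)
          · intro x _ hx
            have hx' := of_decide_eq_true hx
            apply decide_eq_true
            intro hmem
            apply hx'
            rcases List.mem_append.1 hmem with h | h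
            · exact List.mem_append.2 (Or.inl (List.mem_append.2 (Or.inl h)))
            · rcases List.mem_cons.1 h with rfl | h2
              · exact List.mem_append.2 (Or.inl (List.mem_append.2
                  (Or.inr (List.mem_singleton.2 rfl))))
              · exact List.mem_append.2 (Or.inr (List.mem_append.2 (Or.inl h2)))
          · intro c hc
            exact decide_eq_true (hLdisj c hc)
          · intro c hc
            apply decide_eq_false
            intro hmem
            exact hmem (List.mem_append.2 (Or.inr (List.mem_append.2 (Or.inr hc))))
        apply ih fuelB (P ++ [b]) (rest ++ ch.getD b []) _ _
        · -- Nodup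
          have : ((P ++ [b]) ++ (rest ++ ch.getD b [])) =
              (P ++ b :: rest) ++ ch.getD b [] := by simp
          rw [this, List.nodup_append]
          exact ⟨hnd, hkids_nodup b, fun a ha c hc h => (h ▸ hLdisj c hc) ha⟩
        · intro x hx
          rcases List.mem_append.1 hx with h | h
          · exact hqN x (List.mem_cons_of_mem _ h)
          · exact hkidsN b x h
        · intro c p hcp hmem
          have hsplit : c ∈ P ∨ c ∈ b :: rest ∨ c ∈ ch.getD b [] := by
            rcases hmem with h | h
            · rcases List.mem_append.1 h with h1 | h1
              · exact Or.inl h1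
              · exact Or.inr (Or.inl (List.mem_singleton.1 h1 ▸ List.mem_cons_self))
            · rcases List.mem_append.1 h with h1 | h1
              · exact Or.inr (Or.inl (List.mem_cons_of_mem _ h1))
              · exact Or.inr (Or.inr h1)
          rcases hsplit with h | h | h
          · exact List.mem_append.2 (Or.inl (hparP c p hcp (Or.inl h)))
          · exact List.mem_append.2 (Or.inl (hparP c p hcp (Or.inr h)))
          · have : p = b := by
              have := hkids_par b c h
              rw [hcp] at this
              exact Option.some.inj this
            subst this
            exact List.mem_append.2 (Or.inr List.mem_cons_self)
        · intro c p hcp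
          rw [pvDecFold_getD _ (hkids_nodup b)]
          by_cases hpb : p = b
          · subst hpb
            rw [if_pos (hpar_kids c p hcp), hones c (hpar_kids c p hcp)]
            rw [if_pos (List.mem_append.2 (Or.inr List.mem_cons_self))]
            ring
          · have hcL : c ∉ ch.getD b [] := by
              intro hc
              have := hkids_par b c hc
              rw [hcp] at this
              exact hpb (Option.some.inj this)
            rw [if_neg hcL, hind c p hcp]
            by_cases hpP : p ∈ P
            · rw [if_pos hpP, if_pos (List.mem_append.2 (Or.inl hpP))]
            · rw [if_neg hpP, if_neg (by
                intro h
                rcases List.mem_append.1 h with h1 | h1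
                · exact hpP h1
                · exact hpb (List.mem_singleton.1 h1))]
        · rw [List.length_append]
          simp only [List.length_cons] at hfA
          omega
        · rw [List.length_append]
          simp only [List.length_cons] at hfB
          omega

-- the two topological orders coincide (cycles and all: both loops pop the same nodes)
lemma pvTopo_eq (bp : List (String × Option String)) :
    topological_order bp = pvOrderedBranches bp := by
  rw [pvTopoA_eq, pvTopoB_eq, pvRoots_eq]
  have hrootsub : ∀ x ∈ pvRootsB bp, x ∈ (pvNodesOf bp).filter
      (fun n => ((PySem.Dict.ofList bp).getD n none).isNone) := by
    intro x hx
    exact (PySem.List.mem_sorted _ _ _ x).1 hx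
  have hrootnodup : (pvRootsB bp).Nodup :=
    (PySem.List.sorted_perm _ _ _).nodup_iff.2 ((pvNodesOf_nodup bp).filter _)
  refine pvLoop_eq (PySem.Dict.ofList bp) (pvChildrenMap bp) (pvNodesOf bp)
    (pvNodesOf_nodup bp) (pvKids_eq bp)
    (fun b c hc => (pvNodesOf_mem bp c).2
      (Or.inl (pvKey_of_parent bp c b ((pvChildrenMap_mem bp c b).1 hc))))
    (fun b c hc => (pvChildrenMap_mem bp c b).1 hc)
    (fun c p hcp => (pvChildrenMap_mem bp c p).2 hcp)
    (fun b => pvChildrenMap_nodup bp b)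
    (2 * bp.length + 2) (2 * bp.length + 2) [] (pvRootsB bp) (pvIndegOf bp) []
    ?_ ?_ ?_ ?_ ?_ ?_
  · simpa using hrootnodup
  · intro x hx
    exact (List.mem_filter.1 (hrootsub x hx)).1
  · intro c p hcp hmem
    rcases hmem with h | h
    · cases h
    · have := (List.mem_filter.1 (hrootsub c h)).2
      rw [hcp] at this
      simp at this
  · intro c p hcp
    rw [pvIndegOf_getD, hcp]
    simp
  · -- fuel A
    have hcount : ((pvNodesOf bp).filter
          (fun x => decide (x ∉ ([] : List String) ++ pvRootsB bp))).length
        + (pvRootsB bp).length ≤ (pvNodesOf bp).length := by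
      have := pvFilter_length_add_le (p := fun _ => true)
        (q := fun x => decide (x ∉ ([] : List String) ++ pvRootsB bp))
        (pvNodesOf_nodup bp) hrootnodup
        (fun c hc => (List.mem_filter.1 (hrootsub c hc)).1)
        (fun _ _ _ => rfl)
        (fun _ _ => rfl)
        (fun c hc => decide_eq_false (fun hn => hn (by simpa using hc)))
      simpa [List.filter_true] using this
    have := pvNodesOf_length_le bp
    omega
  · -- fuel B
    have hcount : ((pvNodesOf bp).filter
          (fun x => decide (x ∉ ([] : List String) ++ pvRootsB bp))).length
        + (pvRootsB bp).length ≤ (pvNodesOf bp).length := by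
      have := pvFilter_length_add_le (p := fun _ => true)
        (q := fun x => decide (x ∉ ([] : List String) ++ pvRootsB bp))
        (pvNodesOf_nodup bp) hrootnodup
        (fun c hc => (List.mem_filter.1 (hrootsub c hc)).1)
        (fun _ _ _ => rfl)
        (fun _ _ => rfl)
        (fun c hc => decide_eq_false (fun hn => hn (by simpa using hc)))
      simpa [List.filter_true] using this
    have := pvNodesOf_length_le bp
    omega

-- ===== VERDICT (by name: the statement is the Claim_ definition above) =====
theorem descendant_closure_spec : Claim_equal_descendant_closure := by
  intro seeds bp _hdom hpre
  unfold Spec_descendant_closure descendant_closure descendant_closure_alt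
  dsimp only
  rw [PySem.List.foldl_append_if
    (p := fun branch => pvClimb (PySem.Dict.ofList bp) (PySem.Set.ofList seeds)
      ((PySem.Dict.ofList bp).keys.length + 1) (some branch))
    (f := fun x => x)]
  simp only [List.nil_append, List.map_id']
  rw [← pvTopo_eq bp]
  apply List.filter_congr
  intro x hx
  have hxk : x ∈ (PySem.Dict.ofList bp).keys := by
    rw [pvTopo_eq, pvTopoB_eq] at hx
    exact pvTopoLoopB_mem _ _ _ _ (fun y hy => absurd hy List.not_mem_nil) x hx
  have hchu : ∀ b c, c ∈ (pvChildrenMap bp).getD b [] →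
      c ∈ (PySem.List.dedup seeds ++ (PySem.Dict.ofList bp).keys) := by
    intro b c hc
    exact List.mem_append.2 (Or.inr (pvKey_of_parent bp c b ((pvChildrenMap_mem bp c b).1 hc)))
  have hchlen : ∀ b, ((pvChildrenMap bp).getD b []).length ≤ (PySem.Dict.ofList bp).keys.length := by
    intro b
    refine List.Subperm.length_le (List.subperm_of_subset (pvChildrenMap_nodup bp b) ?_)
    intro c hc
    exact pvKey_of_parent bp c b ((pvChildrenMap_mem bp c b).1 hc)
  have hR : ∀ b c, pvReach (PySem.Dict.ofList bp) seeds b →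
      c ∈ (pvChildrenMap bp).getD b [] → pvReach (PySem.Dict.ofList bp) seeds c := by
    intro b c hRb hc
    obtain ⟨k, y, hit, hy⟩ := hRb
    exact ⟨k + 1, y, by rw [pvParentIter, (pvChildrenMap_mem bp c b).1 hc]; exact hit, hy⟩
  have hq0 : ∀ z ∈ PySem.List.dedup seeds,
      z ∈ (PySem.List.dedup seeds ++ (PySem.Dict.ofList bp).keys) :=
    fun z hz => List.mem_append.2 (Or.inl hz)
  have hfuel0 : (PySem.List.dedup seeds).length +
      ((PySem.List.dedup seeds ++ (PySem.Dict.ofList bp).keys).filter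
        (fun z => !(PySem.Set.contains PySem.Set.empty z))).length *
        ((PySem.Dict.ofList bp).keys.length + 1) <
      seeds.length + (seeds.length + bp.length) * (bp.length + 1) + 1 := by
    have hp : (fun z => !(PySem.Set.contains (PySem.Set.empty : PySem.Set String) z))
        = fun _ : String => true := by
      funext z; rfl
    rw [hp, List.filter_true, List.length_append]
    have hdl : (PySem.List.dedup seeds).length ≤ seeds.length := by
      rw [PySem.List.dedup_eq_ofList]; exact PySem.Set.length_ofList_le seeds
    have hkl := pvKeys_length_le bp
    have hmul : ((PySem.List.dedup seeds).length + (PySem.Dict.ofList bp).keys.length) *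
        ((PySem.Dict.ofList bp).keys.length + 1) ≤
        (seeds.length + bp.length) * (bp.length + 1) :=
      Nat.mul_le_mul (by omega) (by omega)
    linarith
  have hqR0 : ∀ z ∈ PySem.List.dedup seeds, pvReach (PySem.Dict.ofList bp) seeds z :=
    fun z hz => ⟨0, z, rfl, (PySem.List.mem_dedup seeds z).1 hz⟩
  obtain ⟨cprog, cclosed, csound⟩ := pvBFS_main (pvChildrenMap bp) (PySem.Dict.ofList bp)
    (PySem.List.dedup seeds ++ (PySem.Dict.ofList bp).keys)
    ((PySem.Dict.ofList bp).keys.length) (pvReach (PySem.Dict.ofList bp) seeds)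
    hchu hchlen hR
    (seeds.length + (seeds.length + bp.length) * (bp.length + 1) + 1)
    PySem.Set.empty (PySem.List.dedup seeds) []
    hq0 hfuel0 (fun z hz => absurd hz (by simp [PySem.Set.empty]))
    (fun z hz => absurd hz (by simp [PySem.Set.empty])) hqR0
  rw [Bool.eq_iff_iff]
  constructor
  · intro h
    obtain ⟨k, y, hit, hy⟩ := csound x ((PySem.Set.contains_iff _ x).1 h)
    have hk : k < (PySem.Dict.ofList bp).keys.length + 1 :=
      pvParentIter_lt_of_some _ hit (hpre x hxk)
    exact (pvClimb_iff _ _ _ x).2 ⟨k, y, hk, hit, (PySem.Set.mem_ofList seeds y).2 hy⟩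
  · intro h
    obtain ⟨k, y, hk, hit, hy⟩ := (pvClimb_iff _ _ _ x).1 h
    apply (PySem.Set.contains_iff _ x).2
    refine pvParentIter_reach_mem bp seeds _ ?_ ?_ k x y hit ((PySem.Set.mem_ofList seeds y).1 hy)
    · intro z hz
      exact cprog z (Or.inr ((PySem.List.mem_dedup seeds z).2 hz))
    · intro p hp c hc
      exact cclosed p hp c ((pvChildrenMap_mem bp c p).2 hc)
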